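-- pv_equiv track=rewrite | github.com/brianmanderson/Raystation_Export_Oblique_Images_to_mhd | Raystation_Export.py | check_roi_presence
-- ===== SOURCE A (Python) =====
-- def check_roi_presence(base_roi):
--     roi_list = ['eye','lens','pituitary','brain','hippo','ventricle','nerve','chiasm']
--     ignore = ['mmm','trimesh','rigid','dir']
--     for roi in roi_list:
--         if max([base_roi.find(i) != -1 for i in ignore]):
--             continue
--         elif base_roi.find(roi) != -1:
--             return True
--     return False
-- ===== SOURCE B (Python) =====
-- def check_roi_presence(base_roi):
--     roi_list = ['eye','lens','pituitary','brain','hippo','ventricle','nerve','chiasm']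
--     ignore = ['mmm','trimesh','rigid','dir']
--     found = False
--     for pos in range(len(base_roi) + 1):
--         for w in ignore:
--             if base_roi.startswith(w, pos):
--                 return False
--         for w in roi_list:
--             if base_roi.startswith(w, pos):
--                 found = True
--     return found
-- ===== Notes on version B (the rewrite author's own statement) =====
-- stated objective: alternative
-- what changed: Instead of A's per-keyword substring scans (find for each ignore word recomputed on every roi-loop iteration), B makes a single left-to-right pass over the string's positions, testing at each suffix whether an ignore word starts there (early False) or a target word starts there (sticky found flag).
import Mathlib
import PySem

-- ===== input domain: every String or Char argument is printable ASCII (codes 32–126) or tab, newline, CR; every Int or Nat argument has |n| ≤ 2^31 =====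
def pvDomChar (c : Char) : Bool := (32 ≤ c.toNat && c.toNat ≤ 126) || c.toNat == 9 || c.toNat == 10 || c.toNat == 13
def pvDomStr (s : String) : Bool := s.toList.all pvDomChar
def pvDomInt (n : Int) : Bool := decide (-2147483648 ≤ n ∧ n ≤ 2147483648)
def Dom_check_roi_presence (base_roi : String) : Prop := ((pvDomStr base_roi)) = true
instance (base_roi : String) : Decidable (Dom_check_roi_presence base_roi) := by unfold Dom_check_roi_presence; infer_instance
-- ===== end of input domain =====

-- B replaces A's per-keyword find-scans by ONE left-to-right scan over the string's suffixes,
-- testing startswith for ignore/target words at each position with a found-accumulator (objective: alternative).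


-- ===== PORT A =====
-- A's loop with early return: structural recursion over roi_list; each iteration
-- recomputes max([base_roi.find(i) != -1 for i in ignore]) (bool max = fold of `max`).
def pvLoopA (base_roi : String) (ignore : List String) : List String → Bool
  | [] => false
  | roi :: rest =>
    if (ignore.map (fun i => PySem.Str.find base_roi i != -1)).foldl max false then
      pvLoopA base_roi ignore rest
    else if PySem.Str.find base_roi roi != -1 then
      true
    else
      pvLoopA base_roi ignore rest

def check_roi_presence (base_roi : String) : Bool :=
  let roi_list := ["eye","lens","pituitary","brain","hippo","ventricle","nerve","chiasm"]
  let ignore := ["mmm","trimesh","rigid","dir"]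
  pvLoopA base_roi ignore roi_list

-- ===== PORT B =====
-- Source B's `for pos in range(len+1): … base_roi.startswith(w, pos) …` tests word w at position pos,
-- i.e. whether w is a prefix of the suffix starting at pos; ported as structural recursion on the
-- char list whose state IS that suffix, with PySem.Chars.startswith — exact on all inputs.
def pvScanB (ign rois : List (List Char)) : List Char → Bool → Bool
  | [], found =>
    if ign.any (fun w => PySem.Chars.startswith [] w) then false
    else found || rois.any (fun w => PySem.Chars.startswith [] w)
  | c :: rest, found =>
    if ign.any (fun w => PySem.Chars.startswith (c :: rest) w) then false
    else pvScanB ign rois rest (found || rois.any (fun w => PySem.Chars.startswith (c :: rest) w))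

def check_roi_presence_alt (base_roi : String) : Bool :=
  let roi_list := ["eye","lens","pituitary","brain","hippo","ventricle","nerve","chiasm"]
  let ignore := ["mmm","trimesh","rigid","dir"]
  pvScanB (ignore.map String.toList) (roi_list.map String.toList) base_roi.toList false

-- ===== PRECONDITION & SPEC =====
def Spec_check_roi_presence (base_roi : String) (out : Bool) : Prop := out = check_roi_presence_alt base_roi
instance (base_roi : String) (out : Bool) : Decidable (Spec_check_roi_presence base_roi out) := by unfold Spec_check_roi_presence; infer_instance

-- ===== CLAIM (what is proved, stated in full; the proofs are below) =====
def Claim_equal_check_roi_presence : Prop := ∀ (base_roi : String), Dom_check_roi_presence base_roi → Spec_check_roi_presence base_roi (check_roi_presence base_roi)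

-- ===== LEMMAS AND PROOFS =====
-- startswith as a decidable prefix test.
theorem sw_eq (cs w : List Char) : PySem.Chars.startswith cs w = decide (w <+: cs) := by
  rw [Bool.eq_iff_iff]
  simp [PySem.Chars.startswith_iff]

-- B's suffix scan computes: false if some ignore word is an infix, else found ∨ some target word is an infix.
theorem pvScanB_eq (ign rois : List (List Char)) (cs : List Char) (found : Bool) :
    pvScanB ign rois cs found =
      if ign.any (fun w => decide (w <:+: cs)) then false
      else found || rois.any (fun w => decide (w <:+: cs)) := by
  induction cs generalizing found with
  | nil =>
    simp only [pvScanB, sw_eq]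
    have h : ∀ (L : List (List Char)),
        (L.any fun w => decide (w <+: ([] : List Char))) = (L.any fun w => decide (w <:+: ([] : List Char))) := by
      intro L
      induction L with
      | nil => rfl
      | cons x xs ihL =>
        simp only [List.any_cons, ihL]
        have hx : decide (x <+: ([] : List Char)) = decide (x <:+: ([] : List Char)) := by
          simp only [decide_eq_decide]
          constructor
          · exact List.IsPrefix.isInfix
          · intro hw; cases List.eq_nil_of_sublist_nil hw.sublist; exact List.nil_prefix
        rw [hx]
    rw [h, h]
  | cons c rest ih =>
    simp only [pvScanB, sw_eq]
    rw [ih]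
    have hsplit : ∀ (L : List (List Char)),
        (L.any fun w => decide (w <:+: c :: rest)) =
          ((L.any fun w => decide (w <+: c :: rest)) || L.any fun w => decide (w <:+: rest)) := by
      intro L
      induction L with
      | nil => rfl
      | cons x xs ihL =>
        simp only [List.any_cons, ihL]
        have : decide (x <:+: c :: rest) = (decide (x <+: c :: rest) || decide (x <:+: rest)) := by
          rw [Bool.eq_iff_iff]
          simp [List.infix_cons_iff]
        rw [this]
        cases decide (x <+: c :: rest) <;> cases decide (x <:+: rest) <;> simp
    rw [hsplit ign, hsplit rois]
    cases h1 : (ign.any fun w => decide (w <+: c :: rest)) <;>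
      cases h2 : (ign.any fun w => decide (w <:+: rest)) <;>
        simp [h1, h2] <;>
          cases found <;> simp [Bool.or_assoc, Bool.or_comm, Bool.or_left_comm]

-- If some ignore substring is present, A's loop always takes `continue` and ends at False.
theorem pvLoopA_ignored (s : String) (ign : List String) (rs : List String)
    (h : (ign.map (fun i => PySem.Str.find s i != -1)).foldl max false = true) :
    pvLoopA s ign rs = false := by
  induction rs with
  | nil => rfl
  | cons r rs ih =>
    simp only [pvLoopA]
    rw [h]
    simpa using ih

-- If no ignore substring is present, A's loop is the any-scan over the targets.
theorem pvLoopA_clean (s : String) (ign : List String) (rs : List String)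
    (h : (ign.map (fun i => PySem.Str.find s i != -1)).foldl max false = false) :
    pvLoopA s ign rs = rs.any (fun r => PySem.Str.find s r != -1) := by
  induction rs with
  | nil => rfl
  | cons r rs ih =>
    simp only [pvLoopA]
    rw [h]
    simp only [Bool.false_eq_true, if_false, List.any_cons, ih]
    by_cases hr : (PySem.Str.find s r != -1) = true
    · rw [hr]; simp
    · rw [Bool.eq_false_iff.mpr hr]; simp

-- Bool max-fold equals any.
theorem foldl_max_eq_any' (b : Bool) (l : List Bool) : l.foldl max b = (b || l.any id) := by
  induction l generalizing b with
  | nil => simp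
  | cons c l ih =>
    simp only [List.foldl]
    rw [ih (max b c)]
    cases b <;> cases c <;> simp

theorem foldl_max_eq_any (l : List Bool) : l.foldl max false = l.any id := by
  simpa using foldl_max_eq_any' false l

-- find s w ≠ -1 (as Bool) is `w.toList is an infix of s.toList`.
theorem find_bool_eq (s w : List Char) :
    (PySem.Chars.find s w != -1) = decide (w <:+: s) := by
  by_cases h : w <:+: s
  · have := (PySem.Chars.find_ne_neg_one_iff s w).mpr h
    simp [bne_iff_ne, this, h]
  · have := (PySem.Chars.find_eq_neg_one_iff s w).mpr h
    simp [this, h]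

-- ===== VERDICT (by name: the statement is the Claim_ definition above) =====
theorem check_roi_presence_spec : Claim_equal_check_roi_presence := by
  intro s _
  unfold Spec_check_roi_presence check_roi_presence check_roi_presence_alt
  rw [pvScanB_eq]
  by_cases h : ((["mmm","trimesh","rigid","dir"] : List String).map
      (fun i => PySem.Str.find s i != -1)).foldl max false = true
  · rw [pvLoopA_ignored s _ _ h]
    rw [foldl_max_eq_any, List.any_map] at h
    simp only [List.map_cons, List.map_nil, List.any_cons, List.any_nil, Function.comp_def, id,
      PySem.Str.find_eq, find_bool_eq, String.toList] at h ⊢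
    simp only [Bool.or_false, Bool.or_eq_true, decide_eq_true_eq] at h
    simp only [Bool.false_eq, Bool.and_eq_false_iff]
    simp
    tauto
  · have h' := Bool.eq_false_iff.mpr h
    rw [pvLoopA_clean s _ _ h']
    rw [foldl_max_eq_any, List.any_map] at h'
    simp only [List.map_cons, List.map_nil, List.any_cons, List.any_nil, Function.comp_def, id,
      PySem.Str.find_eq, find_bool_eq, String.toList] at h' ⊢
    simp only [Bool.or_false, Bool.or_eq_false_iff, decide_eq_false_iff_not] at h'
    simp [h'.1, h'.2.1, h'.2.2.1, h'.2.2.2]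
    rfl
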